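-- pv_equiv track=rewrite | github.com/runwhen-contrib/runwhen-local | src/name_utils.py | split_camel_cased_name
-- ===== SOURCE A (Python) =====
-- def split_camel_cased_name(name: str) -> list[str]:
--     """
--     Splits a camel-cased name into its constituent parts.
--     :param name: The camel-cased name.
--     :return: A list of name parts.
--     """
--     result = []
--     pending_part = ""
--     for c in name:
--         if c.isupper():
--             if pending_part:
--                 result.append(pending_part)
--                 pending_part = ""
--             c = c.lower()
--         pending_part += c
--     if pending_part:
--         result.append(pending_part)
--     return result
-- ===== SOURCE B (Python) =====
-- def split_camel_cased_name(name: str) -> list[str]: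
--     """Two staged passes: first compute the list of part-start indices
--     (index 0 and every uppercase position), then slice the string at
--     consecutive starts, lowercasing only an uppercase boundary char."""
--     starts = [i for i in range(len(name)) if i == 0 or name[i].isupper()]
--     ends = starts[1:] + [len(name)]
--     parts = []
--     for s, e in zip(starts, ends):
--         c = name[s]
--         parts.append((c.lower() if c.isupper() else c) + name[s + 1:e])
--     return parts
-- ===== Notes on version B (the rewrite author's own statement) =====
-- stated objective: alternative
-- what changed: B replaces A's single-pass character accumulator (flush pending part on each uppercase char) by two staged passes: first build the table of part-start indices (0 and every uppercase position), then slice the string between consecutive starts, lowercasing only an uppercase boundary character.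
import Mathlib
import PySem

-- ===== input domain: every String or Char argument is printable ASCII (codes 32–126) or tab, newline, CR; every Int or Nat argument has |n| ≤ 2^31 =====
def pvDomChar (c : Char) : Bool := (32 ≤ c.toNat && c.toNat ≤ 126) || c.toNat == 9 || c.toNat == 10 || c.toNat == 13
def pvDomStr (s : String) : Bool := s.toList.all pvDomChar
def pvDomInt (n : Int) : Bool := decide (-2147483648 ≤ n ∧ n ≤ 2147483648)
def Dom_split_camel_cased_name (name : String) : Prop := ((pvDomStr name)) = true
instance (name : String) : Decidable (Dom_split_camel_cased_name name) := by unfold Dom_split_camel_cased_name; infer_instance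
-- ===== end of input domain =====

-- B replaces A's single-pass flush-on-uppercase accumulator by two staged passes:
-- an index table of part starts, then slicing the string at consecutive starts
-- (objective: alternative decomposition).

-- ===== PORT A =====
-- state: (result so far, pending part); one step per character, in order
def aStep (st : List (List Char) × List Char) (c : Char) : List (List Char) × List Char :=
  if PySem.Chars.isupper c then
    ((if st.2 ≠ [] then st.1 ++ [st.2] else st.1), [PySem.Chars.lowerChar c])
  else
    (st.1, st.2 ++ [c])

def split_camel_cased_name (name : String) : List String :=
  let st := name.toList.foldl aStep ([], [])
  (if st.2 ≠ [] then st.1 ++ [st.2] else st.1).map String.ofList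

-- ===== PORT B =====
-- pass 1: the table of part-start indices (0 and every uppercase position);
-- pass 2: one part per consecutive (start, end) pair, sliced out of the string.
-- name[s+1:e] is ported by hand as drop/take: exact here since 0 ≤ s+1 and e ≤ len.
def bPart (l : List Char) (s e : Nat) : List Char :=
  let c := l.getD s ' '
  (if PySem.Chars.isupper c then PySem.Chars.lowerChar c else c) :: ((l.drop (s + 1)).take (e - (s + 1)))

def split_camel_cased_name_alt (name : String) : List String :=
  let l := name.toList
  let starts := (List.range l.length).filter (fun i => decide (i = 0) || PySem.Chars.isupper (l.getD i ' '))
  let ends := starts.tail ++ [l.length]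
  (starts.zip ends).map (fun p => String.ofList (bPart l p.1 p.2))

-- ===== PRECONDITION & SPEC =====
def Spec_split_camel_cased_name (name : String) (out : List String) : Prop := out = split_camel_cased_name_alt name
instance (name : String) (out : List String) : Decidable (Spec_split_camel_cased_name name out) := by unfold Spec_split_camel_cased_name; infer_instance

-- ===== CLAIM (what is proved, stated in full; the proofs are below) =====
def Claim_equal_split_camel_cased_name : Prop := ∀ (name : String), Dom_split_camel_cased_name name → Spec_split_camel_cased_name name (split_camel_cased_name name)

-- ===== LEMMAS AND PROOFS =====

-- reference splitter: first char (lowercased if upper) plus the following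
-- non-uppercase run, then recurse on the remainder
def chunks : List Char → List (List Char)
  | [] => []
  | c :: t =>
    ((if PySem.Chars.isupper c then PySem.Chars.lowerChar c else c) ::
        t.takeWhile (fun x => !PySem.Chars.isupper x)) ::
      chunks (t.dropWhile (fun x => !PySem.Chars.isupper x))
termination_by l => l.length
decreasing_by
  exact Nat.lt_succ_of_le (t.length_dropWhile_le _)

-- ---- A = chunks ----

theorem aSkip (seg : List Char) (hseg : ∀ c ∈ seg, PySem.Chars.isupper c = false)
    (rest : List Char) (res : List (List Char)) (pend : List Char) :
    (seg ++ rest).foldl aStep (res, pend) = rest.foldl aStep (res, pend ++ seg) := by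
  induction seg generalizing pend with
  | nil => simp
  | cons c seg ih =>
    have hc := hseg c (by simp)
    simp only [List.cons_append, List.foldl_cons, aStep, hc, Bool.false_eq_true, if_false]
    rw [ih (fun x hx => hseg x (by simp [hx])) (pend ++ [c])]
    simp

def pchunks (pend : List Char) (l : List Char) : List (List Char) :=
  (if pend ++ l.takeWhile (fun x => !PySem.Chars.isupper x) = [] then []
   else [pend ++ l.takeWhile (fun x => !PySem.Chars.isupper x)]) ++
    chunks (l.dropWhile (fun x => !PySem.Chars.isupper x))

theorem aMain (n : Nat) (l : List Char) (hn : l.length ≤ n)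
    (res : List (List Char)) (pend : List Char) :
    (let st := l.foldl aStep (res, pend)
     if st.2 ≠ [] then st.1 ++ [st.2] else st.1) = res ++ pchunks pend l := by
  induction n generalizing l res pend with
  | zero =>
    have : l = [] := List.length_eq_zero_iff.mp (Nat.le_zero.mp hn)
    subst this
    by_cases h : pend = [] <;> simp [pchunks, chunks, h]
  | succ n ih =>
    rcases hrest : l.dropWhile (fun x => !PySem.Chars.isupper x) with _ | ⟨u, rest'⟩
    · -- no uppercase after the start: everything is one pending part
      have hl : l.takeWhile (fun x => !PySem.Chars.isupper x) = l := by
        have := l.takeWhile_append_dropWhile (p := fun x => !PySem.Chars.isupper x)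
        rw [hrest] at this; simpa using this
      have hall : ∀ c ∈ l, PySem.Chars.isupper c = false := by
        intro c hc
        have := List.mem_takeWhile_imp (l := l) (p := fun x => !PySem.Chars.isupper x) (hl ▸ hc)
        simpa using this
      have := aSkip l hall [] res pend
      simp only [List.append_nil] at this
      rw [this]
      simp only [List.foldl_nil, pchunks, hl, hrest, chunks]
      by_cases h : pend ++ l = [] <;> simp [h]
    · -- l = seg ++ u :: rest', u uppercase
      have hsplit := l.takeWhile_append_dropWhile (p := fun x => !PySem.Chars.isupper x)
      rw [hrest] at hsplit
      have hall : ∀ c ∈ l.takeWhile (fun x => !PySem.Chars.isupper x),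
          PySem.Chars.isupper c = false := by
        intro c hc
        have := List.mem_takeWhile_imp hc
        simpa using this
      have hu : PySem.Chars.isupper u = true := by
        have := l.head?_dropWhile_not (p := fun x => !PySem.Chars.isupper x)
        rw [hrest] at this
        simpa using this
      have hlen : rest'.length ≤ n := by
        have h1 : (u :: rest').length ≤ l.length := by
          rw [← hrest]; exact l.length_dropWhile_le _
        simp only [List.length_cons] at h1
        omega
      conv_lhs => rw [← hsplit]
      rw [aSkip _ hall]
      simp only [List.foldl_cons, aStep, hu]
      rw [ih rest' hlen _ _]
      simp only [pchunks, hrest, chunks]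
      by_cases h : pend ++ l.takeWhile (fun x => !PySem.Chars.isupper x) = [] <;>
        simp [h, hu]

theorem a_eq_chunks (l : List Char) :
    (let st := l.foldl aStep ([], [])
     if st.2 ≠ [] then st.1 ++ [st.2] else st.1) = chunks l := by
  rw [aMain l.length l le_rfl [] []]
  simp only [List.nil_append, pchunks]
  cases l with
  | nil => simp [chunks]
  | cons c t =>
    by_cases hc : PySem.Chars.isupper c
    · simp [chunks, hc, List.takeWhile, List.dropWhile]
    · simp [chunks, hc, List.takeWhile, List.dropWhile]

-- ---- B = chunks ----

def bStarts (l : List Char) : List Nat :=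
  (List.range l.length).filter (fun i => decide (i = 0) || PySem.Chars.isupper (l.getD i ' '))

def bParts (l : List Char) : List (List Char) :=
  ((bStarts l).zip ((bStarts l).tail ++ [l.length])).map (fun p => bPart l p.1 p.2)

theorem bStarts_cons (c : Char) (t : List Char) :
    bStarts (c :: t) =
      0 :: ((List.range t.length).filter
        (fun i => PySem.Chars.isupper (t.getD i ' '))).map (· + 1) := by
  unfold bStarts
  rw [List.length_cons, List.range_succ_eq_map, List.filter_cons]
  have h0 : (decide ((0 : Nat) = 0) || PySem.Chars.isupper ((c :: t).getD 0 ' ')) = true := by simp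
  rw [h0]
  simp only [if_true]
  congr 1
  rw [List.filter_map]
  congr 1

theorem bStarts_shift (c : Char) (seg rest : List Char)
    (hseg : ∀ x ∈ seg, PySem.Chars.isupper x = false)
    (hrest : rest = [] ∨ ∃ u rest', rest = u :: rest' ∧ PySem.Chars.isupper u = true) :
    bStarts (c :: (seg ++ rest)) = 0 :: (bStarts rest).map (· + (seg.length + 1)) := by
  rw [bStarts_cons]
  congr 1
  have hlen : (seg ++ rest).length = seg.length + rest.length := by simp
  rw [hlen, List.range_add, List.filter_append]
  have h1 : (List.range seg.length).filter
      (fun i => PySem.Chars.isupper ((seg ++ rest).getD i ' ')) = [] := by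
    rw [List.filter_eq_nil_iff]
    intro i hi
    have hi' : i < seg.length := List.mem_range.mp hi
    have hval : (seg ++ rest).getD i ' ' = seg[i] := by
      simp [List.getD, List.getElem?_append_left hi', List.getElem?_eq_getElem hi']
    rw [hval]
    simpa using hseg _ (List.getElem_mem hi')
  rw [h1, List.nil_append, List.filter_map, List.map_map]
  simp only [Function.comp_def]
  -- the shifted filter over rest equals bStarts rest shifted
  have h2 : (List.range rest.length).filter
      (fun i => PySem.Chars.isupper ((seg ++ rest).getD (seg.length + i) ' ')) =
      bStarts rest := by
    unfold bStarts
    apply List.filter_congr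
    intro i hi
    have hi' : i < rest.length := List.mem_range.mp hi
    have hget : (seg ++ rest).getD (seg.length + i) ' ' = rest.getD i ' ' := by
      simp [List.getD, List.getElem?_append_right (by omega : seg.length ≤ seg.length + i)]
    rw [hget]
    rcases hrest with h | ⟨u, rest', rfl, hu⟩
    · subst h; simp at hi'
    · rcases Nat.eq_zero_or_pos i with rfl | hpos
      · simp [List.getD, hu]
      · simp [Nat.pos_iff_ne_zero.mp hpos]
  rw [h2]
  apply List.map_congr_left
  intro i _
  omega

theorem bPart_shift (c : Char) (seg rest : List Char) (s e : Nat) :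
    bPart (c :: (seg ++ rest)) (s + (seg.length + 1)) (e + (seg.length + 1)) =
      bPart rest s e := by
  unfold bPart
  have hget : (c :: (seg ++ rest)).getD (s + (seg.length + 1)) ' ' = rest.getD s ' ' := by
    have h1 : s + (seg.length + 1) = (s + seg.length) + 1 := by omega
    rw [h1]
    simp only [List.getD, List.getElem?_cons_succ]
    rw [List.getElem?_append_right (by omega : seg.length ≤ s + seg.length)]
    congr 2
    omega
  rw [hget]
  have hdrop : (c :: (seg ++ rest)).drop (s + (seg.length + 1) + 1) = rest.drop (s + 1) := by
    have h1 : s + (seg.length + 1) + 1 = (seg.length + (s + 1)) + 1 := by omega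
    rw [h1, List.drop_succ_cons, List.drop_append]
    rw [List.drop_eq_nil_of_le (by omega : seg.length ≤ seg.length + (s + 1))]
    simp only [List.nil_append]
    congr 1
    omega
  rw [hdrop]
  have h2 : e + (seg.length + 1) - (s + (seg.length + 1) + 1) = e - (s + 1) := by omega
  rw [h2]

theorem b_eq_chunks (n : Nat) (l : List Char) (hn : l.length ≤ n) :
    bParts l = chunks l := by
  induction n generalizing l with
  | zero =>
    have : l = [] := List.length_eq_zero_iff.mp (Nat.le_zero.mp hn)
    subst this
    simp [bParts, bStarts, chunks]
  | succ n ih =>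
    cases l with
    | nil => simp [bParts, bStarts, chunks]
    | cons c t =>
      set seg := t.takeWhile (fun x => !PySem.Chars.isupper x) with hseg_def
      set rest := t.dropWhile (fun x => !PySem.Chars.isupper x) with hrest_def
      have hsplit : t = seg ++ rest := (t.takeWhile_append_dropWhile).symm
      have hall : ∀ x ∈ seg, PySem.Chars.isupper x = false := by
        intro x hx
        have := List.mem_takeWhile_imp hx
        simpa using this
      have hrshape : rest = [] ∨ ∃ u rest', rest = u :: rest' ∧ PySem.Chars.isupper u = true := by
        rcases hr : rest with _ | ⟨u, rest'⟩
        · exact Or.inl rfl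
        · refine Or.inr ⟨u, rest', rfl, ?_⟩
          have := t.head?_dropWhile_not (p := fun x => !PySem.Chars.isupper x)
          rw [← hrest_def, hr] at this
          simpa using this
      have hlen : rest.length ≤ n := by
        have := t.length_dropWhile_le (p := fun x => !PySem.Chars.isupper x)
        rw [← hrest_def] at this
        have ht : t.length ≤ n := by simpa using hn
        omega
      have hstarts : bStarts (c :: t) = 0 :: (bStarts rest).map (· + (seg.length + 1)) := by
        rw [show (c :: t) = c :: (seg ++ rest) by rw [← hsplit]]
        exact bStarts_shift c seg rest hall hrshape
      have hchunks : chunks (c :: t) =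
          ((if PySem.Chars.isupper c then PySem.Chars.lowerChar c else c) :: seg) ::
            chunks rest := by
        simp only [chunks]
        rw [← hseg_def, ← hrest_def]
      rcases hrshape with hre | ⟨u, rest', hru, hu⟩
      · -- no further boundary: one part, the whole string
        have hts : t = seg := by rw [hsplit, hre, List.append_nil]
        rw [hchunks, hre]
        simp only [bParts, hstarts, hre]
        simp only [bStarts, List.length_nil, List.range_zero, List.filter_nil,
          List.map_nil, List.tail_cons, List.nil_append, List.zip_cons_cons,
          List.zip_nil_left, List.map_cons, List.map_nil, chunks]
        unfold bPart
        simp [hts, List.getD]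
      · -- at least one more boundary
        have hrest_ne : bStarts rest = 0 :: (bStarts rest).tail := by
          rw [hru, bStarts_cons]
          simp
        rw [hchunks]
        simp only [bParts]
        rw [hstarts, hrest_ne, List.map_cons, List.tail_cons, List.length_cons]
        -- zip (0 :: (0+k) :: S') (((0+k) :: S') ++ [len])
        rw [List.cons_append, List.zip_cons_cons, List.map_cons]
        congr 1
        · -- the first part is (norm c) :: seg
          unfold bPart
          have hget : (c :: t).getD 0 ' ' = c := by simp [List.getD]
          rw [hget]
          simp only [List.drop_succ_cons, List.drop_zero]
          congr 1
          rw [Nat.zero_add, Nat.add_sub_cancel]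
          rw [hsplit, List.take_append_of_le_length le_rfl]
          simp
        · -- the remaining parts are bParts rest, shifted
          have hlen2 : (t.length + 1 : Nat) = rest.length + (seg.length + 1) := by
            rw [hsplit]; simp; omega
          have hzip : ((0 + (seg.length + 1)) :: (bStarts rest).tail.map (· + (seg.length + 1))).zip
                ((bStarts rest).tail.map (· + (seg.length + 1)) ++ [t.length + 1]) =
              (((0 :: (bStarts rest).tail).zip ((bStarts rest).tail ++ [rest.length])).map
                (fun p => (p.1 + (seg.length + 1), p.2 + (seg.length + 1)))) := by
            rw [hlen2]
            rw [show ((bStarts rest).tail.map (· + (seg.length + 1)) ++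
                  [rest.length + (seg.length + 1)]) =
                ((bStarts rest).tail ++ [rest.length]).map (· + (seg.length + 1)) by
              rw [List.map_append]; rfl]
            rw [show ((0 + (seg.length + 1)) :: (bStarts rest).tail.map (· + (seg.length + 1))) =
                (0 :: (bStarts rest).tail).map (· + (seg.length + 1)) by rfl]
            rw [List.zip_map]
            rfl
          rw [hzip, List.map_map]
          have := ih rest hlen
          simp only [bParts] at this
          rw [← this, ← hrest_ne]
          apply List.map_congr_left
          intro p _
          simp only [Function.comp]
          rw [show (c :: t) = c :: (seg ++ rest) by rw [← hsplit]]
          exact bPart_shift c seg rest p.1 p.2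

-- ===== VERDICT (by name: the statement is the Claim_ definition above) =====
theorem split_camel_cased_name_spec : Claim_equal_split_camel_cased_name := by
  intro name _
  show split_camel_cased_name name = split_camel_cased_name_alt name
  unfold split_camel_cased_name split_camel_cased_name_alt
  have hA := a_eq_chunks name.toList
  have hB := b_eq_chunks name.toList.length name.toList le_rfl
  simp only [bParts, bStarts] at hB
  simp only [hA]
  rw [← hB]
  simp only [List.map_map, Function.comp_def]
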